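-- pv_equiv track=rewrite | github.com/esmeraldarosa/letscience-v1 | backend/seed_data.py | classify_indication
-- ===== SOURCE A (Python) =====
-- def classify_indication(text: str, name: str):
--     """
--     Heuristic to classify therapeutic area and specific disease.
--     Returns: (Category, Specific_Disease)
--     """
--     text = text.lower()
--     name = name.lower()
--
--     # Oncology
--     if "melanoma" in text: return "Oncology", "Melanoma"
--     if "lymphoma" in text: return "Oncology", "Lymphoma"
--     if "leukemia" in text: return "Oncology", "Leukemia"
--     if "carcinoma" in text: return "Oncology", "Carcinoma"
--     if any(k in text for k in ["breast cancer", "lung cancer", "prostate cancer"]): return "Oncology", "Solid Tumor"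
--     if any(k in text for k in ["cancer", "tumor", "oncology", "metastatic"]): return "Oncology", "Oncology"
--
--     # Endocrinology
--     if "diabetes" in text: return "Endocrinology", "Diabetes Mellitus"
--     if any(k in text for k in ["insulin", "glucose", "metabolic", "obesity", "weight"]): return "Endocrinology", "Metabolic Disorder"
--
--     # Cardiovascular
--     if "hypertension" in text: return "Cardiovascular", "Hypertension"
--     if "thrombosis" in text or "embolism" in text: return "Cardiovascular", "Thrombosis"
--     if "cholesterol" in text: return "Cardiovascular", "Hyperlipidemia"
--     if any(k in text for k in ["heart", "cardiac", "blood pressure", "stroke", "cardiovascular"]): return "Cardiovascular", "Cardiovascular Disease"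
--
--     # Immunology
--     if "arthritis" in text: return "Immunology", "Rheumatoid Arthritis"
--     if "psoriasis" in text: return "Immunology", "Psoriasis"
--     if "crohn" in text: return "Immunology", "Crohn's Disease"
--     if "colitis" in text: return "Immunology", "Ulcerative Colitis"
--     if any(k in text for k in ["autoimmune", "inflammation", "lupus"]): return "Immunology", "Autoimmune Disease"
--
--     # Infectious
--     if "hiv" in text: return "Infectious Disease", "HIV-1 Infection"
--     if "hepatitis" in text: return "Infectious Disease", "Hepatitis"
--     if any(k in text for k in ["virus", "bacteria", "infection", "antibiotic", "antiviral"]): return "Infectious Disease", "Infectious Disease"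
--
--     # Neurology
--     if "depression" in text: return "Neurology", "Major Depressive Disorder"
--     if "schizophrenia" in text: return "Neurology", "Schizophrenia"
--     if "alzheimer" in text: return "Neurology", "Alzheimer's Disease"
--     if "epilepsy" in text or "seizure" in text: return "Neurology", "Epilepsy"
--     if "migraine" in text: return "Neurology", "Migraine"
--     if any(k in text for k in ["anxiety", "pain", "neurology", "sclerosis"]): return "Neurology", "Neurological Disorder"
--
--     # Respiratory
--     if "asthma" in text: return "Respiratory", "Asthma"
--     if "copd" in text: return "Respiratory", "COPD"
--     if "cystic fibrosis" in text: return "Respiratory", "Cystic Fibrosis"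
--     if any(k in text for k in ["pulmonary", "respiratory", "lung"]): return "Respiratory", "Respiratory Disease"
--
--     return "General Medicine", "General Indication"
-- ===== SOURCE B (Python) =====
-- # Flattened keyword table; classify by collecting ALL matching keyword
-- # positions and selecting the minimum-priority one (no early exit, no cascade).
-- KEYWORDS = [
--     ("melanoma", "Oncology", "Melanoma"),
--     ("lymphoma", "Oncology", "Lymphoma"),
--     ("leukemia", "Oncology", "Leukemia"),
--     ("carcinoma", "Oncology", "Carcinoma"),
--     ("breast cancer", "Oncology", "Solid Tumor"),
--     ("lung cancer", "Oncology", "Solid Tumor"),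
--     ("prostate cancer", "Oncology", "Solid Tumor"),
--     ("cancer", "Oncology", "Oncology"),
--     ("tumor", "Oncology", "Oncology"),
--     ("oncology", "Oncology", "Oncology"),
--     ("metastatic", "Oncology", "Oncology"),
--     ("diabetes", "Endocrinology", "Diabetes Mellitus"),
--     ("insulin", "Endocrinology", "Metabolic Disorder"),
--     ("glucose", "Endocrinology", "Metabolic Disorder"),
--     ("metabolic", "Endocrinology", "Metabolic Disorder"),
--     ("obesity", "Endocrinology", "Metabolic Disorder"),
--     ("weight", "Endocrinology", "Metabolic Disorder"),
--     ("hypertension", "Cardiovascular", "Hypertension"),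
--     ("thrombosis", "Cardiovascular", "Thrombosis"),
--     ("embolism", "Cardiovascular", "Thrombosis"),
--     ("cholesterol", "Cardiovascular", "Hyperlipidemia"),
--     ("heart", "Cardiovascular", "Cardiovascular Disease"),
--     ("cardiac", "Cardiovascular", "Cardiovascular Disease"),
--     ("blood pressure", "Cardiovascular", "Cardiovascular Disease"),
--     ("stroke", "Cardiovascular", "Cardiovascular Disease"),
--     ("cardiovascular", "Cardiovascular", "Cardiovascular Disease"),
--     ("arthritis", "Immunology", "Rheumatoid Arthritis"),
--     ("psoriasis", "Immunology", "Psoriasis"),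
--     ("crohn", "Immunology", "Crohn's Disease"),
--     ("colitis", "Immunology", "Ulcerative Colitis"),
--     ("autoimmune", "Immunology", "Autoimmune Disease"),
--     ("inflammation", "Immunology", "Autoimmune Disease"),
--     ("lupus", "Immunology", "Autoimmune Disease"),
--     ("hiv", "Infectious Disease", "HIV-1 Infection"),
--     ("hepatitis", "Infectious Disease", "Hepatitis"),
--     ("virus", "Infectious Disease", "Infectious Disease"),
--     ("bacteria", "Infectious Disease", "Infectious Disease"),
--     ("infection", "Infectious Disease", "Infectious Disease"),
--     ("antibiotic", "Infectious Disease", "Infectious Disease"),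
--     ("antiviral", "Infectious Disease", "Infectious Disease"),
--     ("depression", "Neurology", "Major Depressive Disorder"),
--     ("schizophrenia", "Neurology", "Schizophrenia"),
--     ("alzheimer", "Neurology", "Alzheimer's Disease"),
--     ("epilepsy", "Neurology", "Epilepsy"),
--     ("seizure", "Neurology", "Epilepsy"),
--     ("migraine", "Neurology", "Migraine"),
--     ("anxiety", "Neurology", "Neurological Disorder"),
--     ("pain", "Neurology", "Neurological Disorder"),
--     ("neurology", "Neurology", "Neurological Disorder"),
--     ("sclerosis", "Neurology", "Neurological Disorder"),
--     ("asthma", "Respiratory", "Asthma"),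
--     ("copd", "Respiratory", "COPD"),
--     ("cystic fibrosis", "Respiratory", "Cystic Fibrosis"),
--     ("pulmonary", "Respiratory", "Respiratory Disease"),
--     ("respiratory", "Respiratory", "Respiratory Disease"),
--     ("lung", "Respiratory", "Respiratory Disease"),
-- ]
--
--
-- def classify_indication(text: str, name: str):
--     """Collect every matching keyword's priority index, take the minimum."""
--     text = text.lower()
--     name = name.lower()  # lowered-but-unused, as in the original
--     hits = [i for i, (kw, _, _) in enumerate(KEYWORDS) if kw in text]
--     if not hits:
--         return "General Medicine", "General Indication"
--     _, cat, dis = KEYWORDS[min(hits)]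
--     return cat, dis
-- ===== Notes on version B (the rewrite author's own statement) =====
-- stated objective: alternative
-- what changed: Replaced the 30-branch first-match if-cascade by a flat keyword-level priority table: B collects the indices of ALL matching keywords (no early exit, no per-rule any()) and returns the table entry at the minimum index.
import Mathlib
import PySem

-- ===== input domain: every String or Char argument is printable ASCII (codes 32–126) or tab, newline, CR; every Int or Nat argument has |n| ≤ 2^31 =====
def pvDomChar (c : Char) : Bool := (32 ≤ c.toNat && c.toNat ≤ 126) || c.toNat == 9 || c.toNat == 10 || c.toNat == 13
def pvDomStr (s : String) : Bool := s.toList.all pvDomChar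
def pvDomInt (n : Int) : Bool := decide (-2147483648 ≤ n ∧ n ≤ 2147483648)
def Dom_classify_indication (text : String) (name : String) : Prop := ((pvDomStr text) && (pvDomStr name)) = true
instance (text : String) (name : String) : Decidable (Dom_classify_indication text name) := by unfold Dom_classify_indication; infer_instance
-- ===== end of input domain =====

-- B replaces A's if-cascade by a flat keyword table: it collects EVERY matching keyword's
-- priority index and returns the rule at the minimum index; objective: alternative (no early exit).


-- ===== PORT A =====
def classify_indication (text : String) (name : String) : String × String :=
  let t := PySem.Str.lower text
  let _n := PySem.Str.lower name
  if PySem.Str.isIn "melanoma" t then ("Oncology", "Melanoma")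
  else if PySem.Str.isIn "lymphoma" t then ("Oncology", "Lymphoma")
  else if PySem.Str.isIn "leukemia" t then ("Oncology", "Leukemia")
  else if PySem.Str.isIn "carcinoma" t then ("Oncology", "Carcinoma")
  else if ["breast cancer", "lung cancer", "prostate cancer"].any (fun k => PySem.Str.isIn k t) then ("Oncology", "Solid Tumor")
  else if ["cancer", "tumor", "oncology", "metastatic"].any (fun k => PySem.Str.isIn k t) then ("Oncology", "Oncology")
  else if PySem.Str.isIn "diabetes" t then ("Endocrinology", "Diabetes Mellitus")
  else if ["insulin", "glucose", "metabolic", "obesity", "weight"].any (fun k => PySem.Str.isIn k t) then ("Endocrinology", "Metabolic Disorder")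
  else if PySem.Str.isIn "hypertension" t then ("Cardiovascular", "Hypertension")
  else if PySem.Str.isIn "thrombosis" t || PySem.Str.isIn "embolism" t then ("Cardiovascular", "Thrombosis")
  else if PySem.Str.isIn "cholesterol" t then ("Cardiovascular", "Hyperlipidemia")
  else if ["heart", "cardiac", "blood pressure", "stroke", "cardiovascular"].any (fun k => PySem.Str.isIn k t) then ("Cardiovascular", "Cardiovascular Disease")
  else if PySem.Str.isIn "arthritis" t then ("Immunology", "Rheumatoid Arthritis")
  else if PySem.Str.isIn "psoriasis" t then ("Immunology", "Psoriasis")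
  else if PySem.Str.isIn "crohn" t then ("Immunology", "Crohn's Disease")
  else if PySem.Str.isIn "colitis" t then ("Immunology", "Ulcerative Colitis")
  else if ["autoimmune", "inflammation", "lupus"].any (fun k => PySem.Str.isIn k t) then ("Immunology", "Autoimmune Disease")
  else if PySem.Str.isIn "hiv" t then ("Infectious Disease", "HIV-1 Infection")
  else if PySem.Str.isIn "hepatitis" t then ("Infectious Disease", "Hepatitis")
  else if ["virus", "bacteria", "infection", "antibiotic", "antiviral"].any (fun k => PySem.Str.isIn k t) then ("Infectious Disease", "Infectious Disease")
  else if PySem.Str.isIn "depression" t then ("Neurology", "Major Depressive Disorder")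
  else if PySem.Str.isIn "schizophrenia" t then ("Neurology", "Schizophrenia")
  else if PySem.Str.isIn "alzheimer" t then ("Neurology", "Alzheimer's Disease")
  else if PySem.Str.isIn "epilepsy" t || PySem.Str.isIn "seizure" t then ("Neurology", "Epilepsy")
  else if PySem.Str.isIn "migraine" t then ("Neurology", "Migraine")
  else if ["anxiety", "pain", "neurology", "sclerosis"].any (fun k => PySem.Str.isIn k t) then ("Neurology", "Neurological Disorder")
  else if PySem.Str.isIn "asthma" t then ("Respiratory", "Asthma")
  else if PySem.Str.isIn "copd" t then ("Respiratory", "COPD")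
  else if PySem.Str.isIn "cystic fibrosis" t then ("Respiratory", "Cystic Fibrosis")
  else if ["pulmonary", "respiratory", "lung"].any (fun k => PySem.Str.isIn k t) then ("Respiratory", "Respiratory Disease")
  else ("General Medicine", "General Indication")

-- ===== PORT B =====
-- flat keyword-level priority table (Source B's KEYWORDS)
def kwTable : List (String × String × String) :=
  [ ("melanoma", "Oncology", "Melanoma"),
    ("lymphoma", "Oncology", "Lymphoma"),
    ("leukemia", "Oncology", "Leukemia"),
    ("carcinoma", "Oncology", "Carcinoma"),
    ("breast cancer", "Oncology", "Solid Tumor"),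
    ("lung cancer", "Oncology", "Solid Tumor"),
    ("prostate cancer", "Oncology", "Solid Tumor"),
    ("cancer", "Oncology", "Oncology"),
    ("tumor", "Oncology", "Oncology"),
    ("oncology", "Oncology", "Oncology"),
    ("metastatic", "Oncology", "Oncology"),
    ("diabetes", "Endocrinology", "Diabetes Mellitus"),
    ("insulin", "Endocrinology", "Metabolic Disorder"),
    ("glucose", "Endocrinology", "Metabolic Disorder"),
    ("metabolic", "Endocrinology", "Metabolic Disorder"),
    ("obesity", "Endocrinology", "Metabolic Disorder"),
    ("weight", "Endocrinology", "Metabolic Disorder"),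
    ("hypertension", "Cardiovascular", "Hypertension"),
    ("thrombosis", "Cardiovascular", "Thrombosis"),
    ("embolism", "Cardiovascular", "Thrombosis"),
    ("cholesterol", "Cardiovascular", "Hyperlipidemia"),
    ("heart", "Cardiovascular", "Cardiovascular Disease"),
    ("cardiac", "Cardiovascular", "Cardiovascular Disease"),
    ("blood pressure", "Cardiovascular", "Cardiovascular Disease"),
    ("stroke", "Cardiovascular", "Cardiovascular Disease"),
    ("cardiovascular", "Cardiovascular", "Cardiovascular Disease"),
    ("arthritis", "Immunology", "Rheumatoid Arthritis"),
    ("psoriasis", "Immunology", "Psoriasis"),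
    ("crohn", "Immunology", "Crohn's Disease"),
    ("colitis", "Immunology", "Ulcerative Colitis"),
    ("autoimmune", "Immunology", "Autoimmune Disease"),
    ("inflammation", "Immunology", "Autoimmune Disease"),
    ("lupus", "Immunology", "Autoimmune Disease"),
    ("hiv", "Infectious Disease", "HIV-1 Infection"),
    ("hepatitis", "Infectious Disease", "Hepatitis"),
    ("virus", "Infectious Disease", "Infectious Disease"),
    ("bacteria", "Infectious Disease", "Infectious Disease"),
    ("infection", "Infectious Disease", "Infectious Disease"),
    ("antibiotic", "Infectious Disease", "Infectious Disease"),
    ("antiviral", "Infectious Disease", "Infectious Disease"),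
    ("depression", "Neurology", "Major Depressive Disorder"),
    ("schizophrenia", "Neurology", "Schizophrenia"),
    ("alzheimer", "Neurology", "Alzheimer's Disease"),
    ("epilepsy", "Neurology", "Epilepsy"),
    ("seizure", "Neurology", "Epilepsy"),
    ("migraine", "Neurology", "Migraine"),
    ("anxiety", "Neurology", "Neurological Disorder"),
    ("pain", "Neurology", "Neurological Disorder"),
    ("neurology", "Neurology", "Neurological Disorder"),
    ("sclerosis", "Neurology", "Neurological Disorder"),
    ("asthma", "Respiratory", "Asthma"),
    ("copd", "Respiratory", "COPD"),
    ("cystic fibrosis", "Respiratory", "Cystic Fibrosis"),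
    ("pulmonary", "Respiratory", "Respiratory Disease"),
    ("respiratory", "Respiratory", "Respiratory Disease"),
    ("lung", "Respiratory", "Respiratory Disease") ]

def classify_indication_alt (text : String) (name : String) : String × String :=
  let t := PySem.Str.lower text
  let _n := PySem.Str.lower name
  let hits := ((PySem.List.enumerate kwTable).filter (fun q => PySem.Str.isIn q.2.1 t)).map (·.1)
  match PySem.List.min? hits (fun x => x) with
  | none => ("General Medicine", "General Indication")
  | some i =>
      let r := PySem.List.pyGetD kwTable i ("", "", "")
      (r.2.1, r.2.2)

-- ===== PRECONDITION & SPEC =====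
def Spec_classify_indication (text : String) (name : String) (out : String × String) : Prop := out = classify_indication_alt text name
instance (text : String) (name : String) (out : String × String) : Decidable (Spec_classify_indication text name out) := by unfold Spec_classify_indication; infer_instance

-- ===== CLAIM (what is proved, stated in full; the proofs are below) =====
def Claim_equal_classify_indication : Prop := ∀ (text : String) (name : String), Dom_classify_indication text name → Spec_classify_indication text name (classify_indication text name)

-- ===== LEMMAS AND PROOFS =====

-- first-match reference function used to bridge the two ports
def firstHit (t : String) : List (String × String × String) → String × String
  | [] => ("General Medicine", "General Indication")
  | (k, c, d) :: rest => if PySem.Str.isIn k t then (c, d) else firstHit t rest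

theorem foldl_min_of_le (l : List Int) (a : Int) (h : ∀ y ∈ l, a ≤ y) : l.foldl min a = a := by
  induction l generalizing a with
  | nil => rfl
  | cons y l ih =>
      have hy : a ≤ y := h y (by simp)
      simp only [List.foldl_cons, min_eq_left hy]
      exact ih a (fun z hz => h z (by simp [hz]))

theorem hits_lb (t : String) (rest : List (String × String × String)) (s : Int) :
    ∀ y ∈ ((PySem.List.enumerate rest s).filter (fun q => PySem.Str.isIn q.2.1 t)).map (·.1), s ≤ y := by
  intro y hy
  simp only [List.mem_map, List.mem_filter] at hy
  obtain ⟨q, ⟨hq, _⟩, rfl⟩ := hy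
  rw [PySem.List.mem_enumerate_iff] at hq
  obtain ⟨k, hk, rfl⟩ := hq
  simp

theorem gen_min (t : String) (tbl pre : List (String × String × String)) :
    (match PySem.List.min? (((PySem.List.enumerate tbl (pre.length : Int)).filter
        (fun q => PySem.Str.isIn q.2.1 t)).map (·.1)) (fun x => x) with
     | none => ("General Medicine", "General Indication")
     | some i =>
        let r := PySem.List.pyGetD (pre ++ tbl) i ("", "", "")
        (r.2.1, r.2.2))
    = firstHit t tbl := by
  induction tbl generalizing pre with
  | nil => simp [PySem.List.enumerate, PySem.List.min?, firstHit]
  | cons x rest ih =>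
      obtain ⟨k, c, d⟩ := x
      rw [PySem.List.enumerate_cons]
      by_cases h : PySem.Str.isIn k t
      · simp only [List.filter_cons, h, if_true, List.map_cons,
          PySem.List.min?_id_cons]
        have hb : ∀ y ∈ ((PySem.List.enumerate rest ((pre.length : Int) + 1)).filter
            (fun q => PySem.Str.isIn q.2.1 t)).map (·.1), (pre.length : Int) ≤ y :=
          fun y hy => le_trans (by omega) (hits_lb t rest ((pre.length : Int) + 1) y hy)
        rw [foldl_min_of_le _ _ hb]
        simp only [firstHit]
        rw [if_pos h]
        simp [PySem.List.pyGetD_natCast, List.getD]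
      · simp only [List.filter_cons, h]
        have h1 : (pre.length : Int) + 1 = ((pre ++ [(k, c, d)]).length : Int) := by
          simp
        have h2 : pre ++ (k, c, d) :: rest = (pre ++ [(k, c, d)]) ++ rest := by simp
        rw [if_neg (by simpa using h), h1, h2, ih]
        simp only [firstHit]
        rw [if_neg h]

theorem alt_eq_firstHit (text name : String) :
    classify_indication_alt text name = firstHit (PySem.Str.lower text) kwTable := by
  have := gen_min (PySem.Str.lower text) kwTable []
  simpa [classify_indication_alt, PySem.List.enumerate] using this

theorem ifor {α : Type} (a b : Bool) (r x : α) :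
    (if a then r else if b then r else x) = if a || b then r else x := by
  cases a <;> simp

-- ===== VERDICT (by name: the statement is the Claim_ definition above) =====
theorem classify_indication_spec : Claim_equal_classify_indication := by
  intro text name _
  unfold Spec_classify_indication
  rw [alt_eq_firstHit]
  simp only [classify_indication, firstHit, kwTable, List.any_cons, List.any_nil,
    Bool.or_false, ifor]
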